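-- pv_equiv track=rewrite | github.com/binom-edu/2022-23-ege | 2022-10-31/ege8.py | f
-- ===== SOURCE A (Python) =====
-- def to_oct(n):
--     ans = ''
--     while n > 0:
--         d = n % 8
--         ans = str(d) + ans
--         n //= 8
--     return ans
--
-- def f(n):
--     n_oct = to_oct(n)
--     if n_oct.count('6') != 1:
--         return False
--     evens = '1357'
--     for i in evens:
--         if i + '6' in n_oct or '6' + i in n_oct:
--             return False
--     return True
-- ===== SOURCE B (Python) =====
-- def f(n):
--     ds = []
--     while n > 0:
--         ds.append(n % 8)
--         n //= 8
--     if ds.count(6) != 1: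
--         return False
--     return all((a != 6 or b % 2 == 0) and (b != 6 or a % 2 == 0)
--                for a, b in zip(ds, ds[1:]))
-- ===== Notes on version B (the rewrite author's own statement) =====
-- stated objective: simpler
-- what changed: B keeps the numeric octal digits in a list and makes one pairwise parity scan over adjacent digits, instead of building an octal string and searching it for the four substring patterns '16','36','56','76' and their mirrors.
import Mathlib
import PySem

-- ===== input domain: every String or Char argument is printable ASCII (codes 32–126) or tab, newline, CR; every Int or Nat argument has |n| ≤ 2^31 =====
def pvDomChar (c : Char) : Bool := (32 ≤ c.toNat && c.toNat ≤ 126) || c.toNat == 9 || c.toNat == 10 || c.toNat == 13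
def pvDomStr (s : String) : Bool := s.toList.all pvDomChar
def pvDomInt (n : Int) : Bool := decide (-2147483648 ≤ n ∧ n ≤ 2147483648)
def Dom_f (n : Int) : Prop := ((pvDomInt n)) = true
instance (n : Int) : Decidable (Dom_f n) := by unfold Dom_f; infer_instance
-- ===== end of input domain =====

-- B replaces A's octal-string construction plus four substring-pattern searches by a single
-- pairwise parity scan over the list of numeric octal digits (objective: simpler).

-- ===== PORT A =====

-- termination of both while-loops: n //= 8 strictly decreases a positive n
theorem pvFloordiv8_lt (n : Int) (h : 0 < n) :
    (PySem.Int.floordiv n 8).toNat < n.toNat := by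
  rw [PySem.Int.floordiv_eq_ediv_of_pos (by omega)]
  omega

-- while n > 0: ans = str(n % 8) + ans; n //= 8   (strings ported on the List Char side)
def toOctLoop (n : Int) (ans : List Char) : List Char :=
  if 0 < n then
    toOctLoop (PySem.Int.floordiv n 8) (PySem.Int.toChars (PySem.Int.mod n 8) ++ ans)
  else ans
termination_by n.toNat
decreasing_by exact pvFloordiv8_lt n (by assumption)

-- for i in '1357': if i+'6' in n_oct or '6'+i in n_oct: return False
def evensLoop : List Char → List Char → Bool
  | [], _ => true
  | i :: rest, s =>
    if PySem.Chars.isIn [i, '6'] s || PySem.Chars.isIn ['6', i] s then false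
    else evensLoop rest s

def f (n : Int) : Bool :=
  let n_oct := toOctLoop n []
  if PySem.Chars.count n_oct ['6'] ≠ 1 then false
  else evensLoop ['1', '3', '5', '7'] n_oct

-- ===== PORT B =====

-- while n > 0: ds.append(n % 8); n //= 8
def digitsLoop (n : Int) (ds : List Int) : List Int :=
  if 0 < n then
    digitsLoop (PySem.Int.floordiv n 8) (ds ++ [PySem.Int.mod n 8])
  else ds
termination_by n.toNat
decreasing_by exact pvFloordiv8_lt n (by assumption)

def f_alt (n : Int) : Bool :=
  let ds := digitsLoop n []
  if ds.count 6 ≠ 1 then false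
  else (ds.zip (PySem.List.slice ds (some 1) none)).all fun p =>
    (decide (p.1 ≠ 6) || decide (PySem.Int.mod p.2 2 = 0)) &&
    (decide (p.2 ≠ 6) || decide (PySem.Int.mod p.1 2 = 0))

-- ===== PRECONDITION & SPEC =====
def Spec_f (n : Int) (out : Bool) : Prop := out = f_alt n
instance (n : Int) (out : Bool) : Decidable (Spec_f n out) := by unfold Spec_f; infer_instance

-- ===== CLAIM (what is proved, stated in full; the proofs are below) =====
def Claim_equal_f : Prop := ∀ (n : Int), Dom_f n → Spec_f n (f n)

-- ===== LEMMAS AND PROOFS =====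

-- the digit-to-character map A applies via str(d)
theorem digitsLoop_acc (n : Int) (ds : List Int) :
    digitsLoop n ds = ds ++ digitsLoop n [] := by
  by_cases h : 0 < n
  · rw [show digitsLoop n ds = digitsLoop (PySem.Int.floordiv n 8) (ds ++ [PySem.Int.mod n 8]) by
        rw [digitsLoop, if_pos h],
      show digitsLoop n [] = digitsLoop (PySem.Int.floordiv n 8) ([] ++ [PySem.Int.mod n 8]) by
        rw [digitsLoop, if_pos h],
      digitsLoop_acc (PySem.Int.floordiv n 8) (ds ++ [PySem.Int.mod n 8]),
      digitsLoop_acc (PySem.Int.floordiv n 8) ([] ++ [PySem.Int.mod n 8])]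
    simp
  · rw [show digitsLoop n ds = ds by rw [digitsLoop, if_neg h],
      show digitsLoop n [] = [] by rw [digitsLoop, if_neg h]]
    simp
termination_by n.toNat
decreasing_by all_goals exact pvFloordiv8_lt n h

theorem digits_bounds (n : Int) : ∀ d ∈ digitsLoop n [], 0 ≤ d ∧ d < 8 := by
  by_cases h : 0 < n
  · rw [show digitsLoop n [] = digitsLoop (PySem.Int.floordiv n 8) ([] ++ [PySem.Int.mod n 8]) by
        rw [digitsLoop, if_pos h],
      digitsLoop_acc]
    intro d hd
    rcases List.mem_append.mp hd with h1 | h2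
    · rw [List.nil_append, List.mem_singleton] at h1
      subst h1
      exact ⟨PySem.Int.mod_nonneg _ (by omega), PySem.Int.mod_lt _ (by omega)⟩
    · exact digits_bounds (PySem.Int.floordiv n 8) d h2
  · rw [show digitsLoop n [] = [] by rw [digitsLoop, if_neg h]]; simp
termination_by n.toNat
decreasing_by all_goals exact pvFloordiv8_lt n h

def dChar (d : Int) : Char := Char.ofNat (48 + d.toNat)

theorem toChars_digit (d : Int) (h0 : 0 ≤ d) (h8 : d < 8) :
    PySem.Int.toChars d = [dChar d] := by
  interval_cases d <;> decide

theorem toOct_eq_digits (n : Int) (ans : List Char) :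
    toOctLoop n ans = ((digitsLoop n []).map dChar).reverse ++ ans := by
  by_cases h : 0 < n
  · rw [show toOctLoop n ans
        = toOctLoop (PySem.Int.floordiv n 8) (PySem.Int.toChars (PySem.Int.mod n 8) ++ ans) by
        rw [toOctLoop, if_pos h],
      show digitsLoop n [] = digitsLoop (PySem.Int.floordiv n 8) ([] ++ [PySem.Int.mod n 8]) by
        rw [digitsLoop, if_pos h],
      toOct_eq_digits (PySem.Int.floordiv n 8),
      digitsLoop_acc (PySem.Int.floordiv n 8) ([] ++ [PySem.Int.mod n 8]),
      toChars_digit _ (PySem.Int.mod_nonneg _ (by omega)) (PySem.Int.mod_lt _ (by omega))]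
    simp [dChar]
  · rw [show toOctLoop n ans = ans by rw [toOctLoop, if_neg h],
      show digitsLoop n [] = [] by rw [digitsLoop, if_neg h]]
    simp
termination_by n.toNat
decreasing_by all_goals exact pvFloordiv8_lt n h

theorem count_go_single (c : Char) (l : List Char) : ∀ (fuel acc : Nat), l.length ≤ fuel →
    PySem.Chars.count.go [c] fuel l acc = acc + l.count c := by
  induction l with
  | nil => intro fuel acc _; cases fuel <;> simp [PySem.Chars.count.go]
  | cons h t ih =>
    intro fuel acc hle
    cases fuel with
    | zero => simp at hle
    | succ f =>
      rw [PySem.Chars.count.go]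
      by_cases hc : c = h
      · subst hc
        simp [List.isPrefixOf, ih f (acc+1) (by simpa using hle)]
        omega
      · simp [List.isPrefixOf, hc, ih f acc (by simpa using hle), Ne.symm hc]

theorem count_single (s : List Char) (c : Char) :
    PySem.Chars.count s [c] = s.count c := by
  rw [PySem.Chars.count]
  simpa using count_go_single c s s.length 0 le_rfl

theorem mem_zip_tail {α : Type} (l : List α) (a b : α) :
    (a, b) ∈ l.zip l.tail ↔ [a, b] <:+: l := by
  induction l with
  | nil => simp
  | cons x t ih =>
    cases t with
    | nil => simp [List.infix_cons_iff, List.prefix_cons_iff]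
    | cons y t' =>
      rw [List.infix_cons_iff]
      constructor
      · intro hm
        rcases List.mem_cons.mp hm with he | hm'
        · left
          simp at he
          simp [he.1, he.2, List.prefix_cons_iff]
        · right; exact ih.mp (by simpa using hm')
      · rintro (hp | hi)
        · rcases List.cons_prefix_cons.mp hp with ⟨rfl, hp2⟩
          rcases List.cons_prefix_cons.mp hp2 with ⟨rfl, _⟩
          simp
        · exact List.mem_cons.mpr (Or.inr (ih.mpr hi))

theorem dChar_inj (a b : Int) (ha : 0 ≤ a ∧ a < 8) (hb : 0 ≤ b ∧ b < 8)
    (h : dChar a = dChar b) : a = b := by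
  obtain ⟨ha1, ha2⟩ := ha; obtain ⟨hb1, hb2⟩ := hb
  revert h
  interval_cases a <;> interval_cases b <;> decide

theorem pair_infix_map (l : List Int) (x y : Int)
    (hl : ∀ d ∈ l, 0 ≤ d ∧ d < 8) (hx : 0 ≤ x ∧ x < 8) (hy : 0 ≤ y ∧ y < 8) :
    ([dChar x, dChar y] <:+: l.map dChar) ↔ [x, y] <:+: l := by
  rw [← mem_zip_tail, ← mem_zip_tail, ← List.map_tail]
  rw [List.zip_map, List.mem_map]
  constructor
  · rintro ⟨⟨a, b⟩, hm, hab⟩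
    simp only [Prod.map, Prod.mk.injEq] at hab
    obtain ⟨h1, h2⟩ := hab
    have hab' := List.of_mem_zip hm
    have ha := hl a (hab'.1)
    have hb2 := hl b (List.mem_of_mem_tail hab'.2)
    rwa [← dChar_inj a x ha hx h1, ← dChar_inj b y hb2 hy h2]
  · intro hm
    exact ⟨(x, y), hm, rfl⟩

theorem evensLoop_eq (xs s : List Char) :
    evensLoop xs s
      = xs.all fun i => !(PySem.Chars.isIn [i, '6'] s || PySem.Chars.isIn ['6', i] s) := by
  induction xs with
  | nil => rfl
  | cons i rest ih =>
    rw [evensLoop, List.all_cons, ← ih]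
    by_cases h : (PySem.Chars.isIn [i, '6'] s || PySem.Chars.isIn ['6', i] s) = true
    · simp [h]
    · simp [Bool.not_eq_true] at h
      simp [h]

theorem count_map_digits (ds : List Int) (hb : ∀ d ∈ ds, 0 ≤ d ∧ d < 8) :
    (ds.map dChar).count '6' = ds.count 6 := by
  rw [List.count_eq_countP, List.count_eq_countP, List.countP_map]
  refine List.countP_congr ?_
  intro d hd
  simp only [Function.comp]
  by_cases h6 : d = 6
  · subst h6; decide
  · have : ¬ (dChar d = '6') := fun hc => h6 (dChar_inj d 6 (hb d hd) (by omega) hc)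
    simp [this, h6]

theorem key_iff (ds : List Int) (hb : ∀ d ∈ ds, 0 ≤ d ∧ d < 8) :
    (∀ x ∈ ([1, 3, 5, 7] : List Int), ¬([6, x] <:+: ds) ∧ ¬([x, 6] <:+: ds)) ↔
      (∀ a b : Int, [a, b] <:+: ds →
        (a ≠ 6 ∨ PySem.Int.mod b 2 = 0) ∧ (b ≠ 6 ∨ PySem.Int.mod a 2 = 0)) := by
  constructor
  · intro h a b hab
    have ha := hb a (hab.subset (by simp))
    have hbb := hb b (hab.subset (by simp))
    rw [PySem.Int.mod_eq_emod_of_pos (by omega), PySem.Int.mod_eq_emod_of_pos (by omega)]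
    constructor
    · by_cases h6 : a = 6
      · subst h6
        right
        by_contra hodd
        have : b = 1 ∨ b = 3 ∨ b = 5 ∨ b = 7 := by omega
        rcases this with rfl | rfl | rfl | rfl <;>
          exact absurd hab (h _ (by decide)).1
      · exact Or.inl h6
    · by_cases h6 : b = 6
      · subst h6
        right
        by_contra hodd
        have : a = 1 ∨ a = 3 ∨ a = 5 ∨ a = 7 := by omega
        rcases this with rfl | rfl | rfl | rfl <;>
          exact absurd hab (h _ (by decide)).2
      · exact Or.inl h6
  · intro h x hx
    constructor
    · intro hin
      have := (h 6 x hin).1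
      rcases this with h' | h'
      · exact h' rfl
      · fin_cases hx <;> simp [PySem.Int.mod] at h'
    · intro hin
      have := (h x 6 hin).2
      rcases this with h' | h'
      · exact h' rfl
      · fin_cases hx <;> simp [PySem.Int.mod] at h'

theorem infix_rev (ds : List Int) (hb : ∀ d ∈ ds, 0 ≤ d ∧ d < 8) (x y : Int)
    (hx : 0 ≤ x ∧ x < 8) (hy : 0 ≤ y ∧ y < 8) :
    ([dChar x, dChar y] <:+: (ds.map dChar).reverse) ↔ [y, x] <:+: ds := by
  rw [show [dChar x, dChar y] = [dChar y, dChar x].reverse from rfl, List.reverse_infix,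
    pair_infix_map ds y x hb hy hx]

theorem A_iff (ds : List Int) (hb : ∀ d ∈ ds, 0 ≤ d ∧ d < 8) :
    (evensLoop ['1', '3', '5', '7'] ((ds.map dChar).reverse) = true) ↔
      (∀ x ∈ ([1, 3, 5, 7] : List Int), ¬([6, x] <:+: ds) ∧ ¬([x, 6] <:+: ds)) := by
  simp only [evensLoop_eq, List.all_eq_true, List.forall_mem_cons,
    Bool.not_eq_true', Bool.or_eq_false_iff, PySem.Chars.isIn_eq_false_iff]
  rw [show ('1' : Char) = dChar 1 from by decide, show ('3' : Char) = dChar 3 from by decide,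
    show ('5' : Char) = dChar 5 from by decide, show ('7' : Char) = dChar 7 from by decide,
    show ('6' : Char) = dChar 6 from by decide]
  rw [infix_rev ds hb 1 6 (by omega) (by omega), infix_rev ds hb 6 1 (by omega) (by omega),
    infix_rev ds hb 3 6 (by omega) (by omega), infix_rev ds hb 6 3 (by omega) (by omega),
    infix_rev ds hb 5 6 (by omega) (by omega), infix_rev ds hb 6 5 (by omega) (by omega),
    infix_rev ds hb 7 6 (by omega) (by omega), infix_rev ds hb 6 7 (by omega) (by omega)]
  tauto

theorem main_eq (n : Int) : f n = f_alt n := by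
  unfold f f_alt
  have hS : toOctLoop n [] = ((digitsLoop n []).map dChar).reverse := by
    simpa using toOct_eq_digits n []
  have hb := digits_bounds n
  simp only [hS]
  rw [count_single, List.count_reverse, count_map_digits _ hb]
  by_cases hc : (digitsLoop n []).count 6 ≠ 1
  · simp [hc]
  · simp only [hc, if_false]
    rw [Bool.eq_iff_iff, A_iff _ hb, key_iff _ hb]
    rw [PySem.List.slice_from _ (by omega), show Int.toNat 1 = 1 from rfl, List.drop_one]
    simp only [List.all_eq_true]
    constructor
    · rintro h ⟨a, b⟩ hp
      have h2 := h a b ((mem_zip_tail _ a b).mp hp)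
      simp only [Bool.and_eq_true, Bool.or_eq_true, decide_eq_true_eq]
      exact h2
    · intro h a b hab
      have h2 := h (a, b) ((mem_zip_tail _ a b).mpr hab)
      simp only [Bool.and_eq_true, Bool.or_eq_true, decide_eq_true_eq] at h2
      exact h2

-- ===== VERDICT (by name: the statement is the Claim_ definition above) =====
theorem f_spec : Claim_equal_f := by
  intro n _
  unfold Spec_f
  exact main_eq n
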